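-- pv_equiv track=rewrite | github.com/Mindev27/Solving-BOJ | 백준/Silver/28015. 영역 색칠/영역 색칠.py | draw_count
-- ===== SOURCE A (Python) =====
-- def draw_count(mylist): #덧칠하는 최소횟수 구하기
--
--   #0이나 빈 리스트라면 0 반환
--   cnt_0 = mylist.count(0)
--   if cnt_0 == len(mylist):
--     return 0
--
--   mylist.insert(0,0)
--   cnt_1 = 0
--   cnt_2 = 0
--
--   #1을 덧칠할 경우
--   for i in range(1, len(mylist)):
--
--     if mylist[i] == 1: #1일때 앞 인덱스 확인
--       if mylist[i-1] != 1:
--         cnt_1 += 1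
--
--   cnt_1 += 1 #2를 칠하는 횟수 +1
--
--   #2를 덧칠할 경우
--   for i in range(1, len(mylist)):
--
--     if mylist[i] == 2: #2일때 앞 인덱스 확인
--       if mylist[i-1] != 2:
--         cnt_2 += 1
--
--   cnt_2 += 1 #1을 칠하는 횟수 +1
--
--   return min(cnt_1, cnt_2)
-- ===== SOURCE B (Python) =====
-- def draw_count(mylist):
--     # all zeros (or empty): nothing to paint
--     if mylist.count(0) == len(mylist):
--         return 0
--     # collapse the list into its maximal-run keys, then tally runs of 1 and of 2
--     runs = []
--     for x in mylist:
--         if not runs or runs[-1] != x: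
--             runs.append(x)
--     return min(runs.count(1), runs.count(2)) + 1
-- ===== Notes on version B (the rewrite author's own statement) =====
-- stated objective: idiomatic
-- what changed: Instead of two separate index-based scans comparing mylist[i] with mylist[i-1] (each counting starts of runs of one colour, on a list mutated by insert(0,0)), B builds the list of maximal-run keys in one pass and returns min of the counts of 1-run and 2-run keys, plus 1; B does not mutate the argument.
import Mathlib
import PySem

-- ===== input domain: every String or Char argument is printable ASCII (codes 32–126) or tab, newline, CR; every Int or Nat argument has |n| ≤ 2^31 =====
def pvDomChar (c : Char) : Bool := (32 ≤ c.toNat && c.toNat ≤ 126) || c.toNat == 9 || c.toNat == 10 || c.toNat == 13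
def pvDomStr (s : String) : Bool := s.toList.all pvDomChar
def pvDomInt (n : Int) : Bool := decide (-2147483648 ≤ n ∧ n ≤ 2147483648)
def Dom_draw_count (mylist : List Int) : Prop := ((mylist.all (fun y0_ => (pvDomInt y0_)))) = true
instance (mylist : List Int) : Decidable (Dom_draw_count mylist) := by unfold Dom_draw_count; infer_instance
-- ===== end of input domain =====

-- B replaces A's two index-comparison scans by a single pass that collapses the list into its
-- maximal-run keys and tallies them (idiomatic decomposition). A mutates its argument
-- (insert(0,0)) when it is not all zeros; B does not — the claim is about the return value only.


-- ===== PORT A =====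
def draw_count (mylist : List Int) : Int :=
  let cnt_0 := PySem.List.count mylist 0
  if (cnt_0 : Int) = PySem.List.len mylist then 0
  else
    let ml := PySem.List.insert mylist 0 0
    let cnt_1 : Int :=
      (PySem.List.pyRange 1 (PySem.List.len ml)).foldl
        (fun c i =>
          if PySem.List.pyGetD ml i 0 = 1 then
            (if PySem.List.pyGetD ml (i - 1) 0 ≠ 1 then c + 1 else c)
          else c) 0
    let cnt_1 := cnt_1 + 1
    let cnt_2 : Int :=
      (PySem.List.pyRange 1 (PySem.List.len ml)).foldl
        (fun c i =>
          if PySem.List.pyGetD ml i 0 = 2 then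
            (if PySem.List.pyGetD ml (i - 1) 0 ≠ 2 then c + 1 else c)
          else c) 0
    let cnt_2 := cnt_2 + 1
    min cnt_1 cnt_2

-- ===== PORT B =====
def draw_count_alt (mylist : List Int) : Int :=
  if (PySem.List.count mylist 0 : Int) = PySem.List.len mylist then 0
  else
    let runs := mylist.foldl
      (fun runs x => if runs.isEmpty || runs.getLast? != some x then runs ++ [x] else runs)
      ([] : List Int)
    min (PySem.List.count runs 1 : Int) (PySem.List.count runs 2 : Int) + 1

-- ===== PRECONDITION & SPEC =====
def Spec_draw_count (mylist : List Int) (out : Int) : Prop := out = draw_count_alt mylist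
instance (mylist : List Int) (out : Int) : Decidable (Spec_draw_count mylist out) := by unfold Spec_draw_count; infer_instance

-- ===== CLAIM (what is proved, stated in full; the proofs are below) =====
def Claim_equal_draw_count : Prop := ∀ (mylist : List Int), Dom_draw_count mylist → Spec_draw_count mylist (draw_count mylist)

-- ===== LEMMAS AND PROOFS =====

-- number of maximal runs of the value v in xs, given the element preceding xs
def pvRises (v prev : Int) : List Int → Nat
  | [] => 0
  | x :: xs => (if x = v ∧ prev ≠ v then 1 else 0) + pvRises v x xs

-- A's prev-comparison loop over indices k+1 .. len-1 counts the rises after position k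
lemma pvLoopA (v : Int) (ml : List Int) :
    ∀ (n k : Nat) (c : Int), ml.length - (k + 1) = n → k < ml.length →
      (PySem.List.pyRange (↑(k + 1)) (PySem.List.len ml)).foldl
        (fun c i =>
          if PySem.List.pyGetD ml i 0 = v then
            (if PySem.List.pyGetD ml (i - 1) 0 ≠ v then c + 1 else c)
          else c) c
      = c + ↑(pvRises v (ml.getD k 0) (ml.drop (k + 1))) := by
  intro n
  induction n with
  | zero =>
    intro k c hn hk
    have hlen : ml.length = k + 1 := by omega
    rw [PySem.List.pyRange_one_eq_nil (by simp [PySem.List.len, hlen])]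
    rw [List.foldl_nil, show k + 1 = ml.length from hlen.symm, List.drop_length]
    simp [pvRises]
  | succ n ih =>
    intro k c hn hk
    have hlt : k + 1 < ml.length := by omega
    rw [PySem.List.pyRange_one_cons (by simp [PySem.List.len]; exact_mod_cast hlt)]
    rw [List.foldl_cons]
    have h1 : PySem.List.pyGetD ml (↑(k + 1)) 0 = ml.getD (k + 1) 0 :=
      PySem.List.pyGetD_natCast ml (k + 1) 0
    have h2 : PySem.List.pyGetD ml ((↑(k + 1) : Int) - 1) 0 = ml.getD k 0 := by
      have : ((↑(k + 1) : Int) - 1) = (↑k : Int) := by push_cast; ring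
      rw [this, PySem.List.pyGetD_natCast]
    have hcast : ((↑(k + 1) : Int) + 1) = (↑(k + 1 + 1) : Int) := by push_cast; ring
    rw [h1, h2, hcast, ih (k + 1) _ (by omega) hlt]
    have hdrop : ml.drop (k + 1) = ml.getD (k + 1) 0 :: ml.drop (k + 1 + 1) := by
      rw [List.getD_eq_getElem ml 0 hlt, List.drop_eq_getElem_cons hlt]
    rw [hdrop]
    simp only [pvRises]
    split_ifs with hx hp hp <;> push_cast <;> omega

-- B's run-collecting fold: counting v among the run keys counts the rises
lemma pvLoopB (v : Int) : ∀ (xs rs : List Int) (prev : Int), rs.getLast? = some prev →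
    (xs.foldl (fun runs x => if runs.isEmpty || runs.getLast? != some x then runs ++ [x] else runs) rs).count v
    = rs.count v + pvRises v prev xs := by
  intro xs
  induction xs with
  | nil => intro rs prev h; simp [pvRises]
  | cons x xs ih =>
    intro rs prev h
    have hne : rs ≠ [] := by intro hrs; rw [hrs] at h; simp at h
    rw [List.foldl_cons]
    by_cases hpx : prev = x
    · have hcond : (rs.isEmpty || rs.getLast? != some x) = false := by
        simp [List.isEmpty_eq_false_iff.mpr hne, h, hpx]
      rw [hcond]
      simp only [Bool.false_eq_true, if_false]
      rw [ih rs prev h, hpx]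
      simp only [pvRises]
      have hnx : ¬ (x = v ∧ ¬ x = v) := fun h' => h'.2 h'.1
      simp [hnx]
    · have hcond : (rs.isEmpty || rs.getLast? != some x) = true := by
        simp [h]; exact Or.inr hpx
      rw [hcond]
      simp only [if_true]
      have hlast : (rs ++ [x]).getLast? = some x := by simp
      rw [ih (rs ++ [x]) x hlast]
      rw [List.count_append]
      simp only [pvRises, List.count_cons, List.count_nil, beq_iff_eq, Nat.zero_add]
      by_cases hxv : x = v
      · rw [if_pos hxv, if_pos (⟨hxv, fun hpv => hpx (by rw [hpv, hxv])⟩ : x = v ∧ ¬ prev = v)]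
        omega
      · rw [if_neg hxv, if_neg (fun h' : x = v ∧ ¬ prev = v => hxv h'.1)]
        omega

-- starting from the empty accumulator, the run-key count of a nonzero v is the rise count after 0
lemma pvCountRuns (v : Int) (hv : v ≠ 0) (l : List Int) :
    (l.foldl (fun runs x => if runs.isEmpty || runs.getLast? != some x then runs ++ [x] else runs)
      ([] : List Int)).count v = pvRises v 0 l := by
  cases l with
  | nil => simp [pvRises]
  | cons x xs =>
    rw [List.foldl_cons]
    have hcond : (([] : List Int).isEmpty || ([] : List Int).getLast? != some x) = true := by simp
    rw [hcond]
    simp only [if_true, List.nil_append]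
    rw [pvLoopB v xs [x] x (by simp)]
    simp only [pvRises]
    by_cases hxv : x = v
    · simp [hxv, Ne.symm hv]
    · simp [hxv]

lemma pvInsert0 (mylist : List Int) : PySem.List.insert mylist 0 0 = 0 :: mylist := by
  simp [PySem.List.insert, PySem.List.sliceIndices]

-- ===== VERDICT (by name: the statement is the Claim_ definition above) =====
theorem draw_count_spec : Claim_equal_draw_count := by
  intro mylist _
  unfold Spec_draw_count draw_count draw_count_alt
  by_cases hz : (PySem.List.count mylist 0 : Int) = PySem.List.len mylist
  · simp only [hz, if_true]
  · simp only [hz, if_false]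
    rw [pvInsert0]
    have hA1 := pvLoopA 1 (0 :: mylist) mylist.length 0 0 (by simp) (by simp)
    have hA2 := pvLoopA 2 (0 :: mylist) mylist.length 0 0 (by simp) (by simp)
    simp only [Nat.reduceAdd, Nat.cast_one, List.getD_cons_zero, List.drop_one, List.tail_cons] at hA1 hA2
    rw [hA1, hA2]
    simp only [PySem.List.count]
    rw [pvCountRuns 1 (by norm_num) mylist, pvCountRuns 2 (by norm_num) mylist]
    omega
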